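-- pv_equiv track=rewrite | github.com/bartolomej/programiranje1 | srecanja.py | odsek
-- ===== SOURCE A (Python) =====
-- def odsek(x, y, smer, razdalja):
--     coords = [(x, y)]
--     for i in range(0, razdalja):
--         if smer == "<":
--             coords.append((coords[i][0] - 1, y))
--         elif smer == ">":
--             coords.append((coords[i][0] + 1, y))
--         elif smer == "^":
--             coords.append((x, coords[i][1] + 1))
--         elif smer == "v":
--             coords.append((x, coords[i][1] - 1))
--     return coords
-- ===== SOURCE B (Python) =====
-- def _step(smer):
--     if smer == "<":
--         return (-1, 0)
--     if smer == ">":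
--         return (1, 0)
--     if smer == "^":
--         return (0, 1)
--     if smer == "v":
--         return (0, -1)
--     return None
--
--
-- def odsek(x, y, smer, razdalja):
--     d = _step(smer)
--     if d is None:
--         return [(x, y)]
--     dx, dy = d
--     return [(x, y)] + [(x + dx * (i + 1), y + dy * (i + 1)) for i in range(razdalja)]
-- ===== Notes on version B (the rewrite author's own statement) =====
-- stated objective: simpler
-- what changed: Decodes the direction into a step vector once and builds the coordinates by a closed-form formula x+dx*(i+1), y+dy*(i+1) over range(razdalja), instead of branching on smer inside the loop and reading the previous element coords[i]. (avoids per-step list indexing/append, hence the constant-factor speedup).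
import Mathlib
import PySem

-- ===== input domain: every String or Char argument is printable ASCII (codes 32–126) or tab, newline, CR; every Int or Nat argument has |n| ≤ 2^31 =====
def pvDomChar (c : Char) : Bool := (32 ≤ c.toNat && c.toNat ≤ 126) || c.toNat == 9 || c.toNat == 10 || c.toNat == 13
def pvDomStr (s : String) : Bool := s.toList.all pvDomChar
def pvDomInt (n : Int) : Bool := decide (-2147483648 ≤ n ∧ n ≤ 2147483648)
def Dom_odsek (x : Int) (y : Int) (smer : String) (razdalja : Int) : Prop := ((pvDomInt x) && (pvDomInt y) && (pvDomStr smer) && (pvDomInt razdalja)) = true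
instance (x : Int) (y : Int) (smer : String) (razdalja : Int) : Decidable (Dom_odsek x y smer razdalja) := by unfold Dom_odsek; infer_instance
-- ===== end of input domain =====

-- B decodes the direction into a step vector once and builds the coordinates by a closed-form
-- formula instead of A's in-loop branching on smer and recurrence on the previous element (objective: simpler).


-- ===== PORT A =====
-- coords[i] is always in range when reached (i < len(coords) holds throughout), so the
-- pyGetD default (0, 0) is never used.
def odsek (x : Int) (y : Int) (smer : String) (razdalja : Int) : List (Int × Int) :=
  (PySem.List.pyRange 0 razdalja 1).foldl (fun coords i =>
    if smer = "<" then coords ++ [((PySem.List.pyGetD coords i (0, 0)).1 - 1, y)]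
    else if smer = ">" then coords ++ [((PySem.List.pyGetD coords i (0, 0)).1 + 1, y)]
    else if smer = "^" then coords ++ [(x, (PySem.List.pyGetD coords i (0, 0)).2 + 1)]
    else if smer = "v" then coords ++ [(x, (PySem.List.pyGetD coords i (0, 0)).2 - 1)]
    else coords) [(x, y)]

-- ===== PORT B =====
def stepOf (smer : String) : Option (Int × Int) :=
  if smer = "<" then some (-1, 0)
  else if smer = ">" then some (1, 0)
  else if smer = "^" then some (0, 1)
  else if smer = "v" then some (0, -1)
  else none

def odsek_alt (x : Int) (y : Int) (smer : String) (razdalja : Int) : List (Int × Int) :=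
  match stepOf smer with
  | none => [(x, y)]
  | some (dx, dy) =>
      [(x, y)] ++ (PySem.List.pyRange 0 razdalja 1).map
        (fun i => (x + dx * (i + 1), y + dy * (i + 1)))

-- ===== PRECONDITION & SPEC =====
def Spec_odsek (x : Int) (y : Int) (smer : String) (razdalja : Int) (out : List (Int × Int)) : Prop := out = odsek_alt x y smer razdalja
instance (x : Int) (y : Int) (smer : String) (razdalja : Int) (out : List (Int × Int)) : Decidable (Spec_odsek x y smer razdalja out) := by unfold Spec_odsek; infer_instance

-- ===== CLAIM (what is proved, stated in full; the proofs are below) =====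
def Claim_equal_odsek : Prop := ∀ (x : Int) (y : Int) (smer : String) (razdalja : Int), Dom_odsek x y smer razdalja → Spec_odsek x y smer razdalja (odsek x y smer razdalja)

-- ===== LEMMAS AND PROOFS =====

theorem foldl_keep {α β : Type} (l : List β) (init : α) :
    l.foldl (fun c (_ : β) => c) init = init := by
  induction l generalizing init with
  | nil => rfl
  | cons a l ih => simp [List.foldl, ih init]

-- the element at index k of the closed-form list is (x + dx*k, y + dy*k)
theorem get_closed (x y dx dy : Int) (n k : ℕ) (hk : k < n + 1) :
    PySem.List.pyGetD ((x, y) :: (PySem.List.pyRange 0 (n : Int) 1).map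
        (fun i => (x + dx * (i + 1), y + dy * (i + 1)))) (k : Int) (0, 0)
      = (x + dx * k, y + dy * k) := by
  rw [PySem.List.pyGetD_natCast]
  cases k with
  | zero => simp
  | succ m =>
      have hlen : m < ((PySem.List.pyRange 0 (n : Int) 1).map
          (fun i => (x + dx * (i + 1), y + dy * (i + 1)))).length := by
        simp [PySem.List.length_pyRange_one]; omega
      rw [List.getD_cons_succ, List.getD_eq_getElem _ _ hlen, List.getElem_map,
          PySem.List.getElem_pyRange_one]
      norm_num

theorem loop_closed (x y dx dy : Int) (f : List (Int × Int) → Int → List (Int × Int))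
    (hf : ∀ c (k : ℕ), PySem.List.pyGetD c (k : Int) (0, 0) = (x + dx * k, y + dy * k) →
        f c (k : Int) = c ++ [(x + dx * ((k : Int) + 1), y + dy * ((k : Int) + 1))])
    (n : ℕ) :
    (PySem.List.pyRange 0 (n : Int) 1).foldl f [(x, y)]
      = (x, y) :: (PySem.List.pyRange 0 (n : Int) 1).map
          (fun i => (x + dx * (i + 1), y + dy * (i + 1))) := by
  induction n with
  | zero => rfl
  | succ n ih =>
      have hc : ((n + 1 : ℕ) : Int) = (n : Int) + 1 := by push_cast; ring
      rw [hc, PySem.List.pyRange_one_succ_right (by positivity),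
          List.foldl_append, List.map_append, ih]
      have hget := get_closed x y dx dy n n (by omega)
      simp [List.foldl, hf _ n hget]

theorem odsek_dir (x y dx dy : Int) (smer : String) (razdalja : Int)
    (hs : stepOf smer = some (dx, dy))
    (hf : ∀ c (k : ℕ), PySem.List.pyGetD c (k : Int) (0, 0) = (x + dx * k, y + dy * k) →
        (if smer = "<" then c ++ [((PySem.List.pyGetD c (k : Int) (0, 0)).1 - 1, y)]
         else if smer = ">" then c ++ [((PySem.List.pyGetD c (k : Int) (0, 0)).1 + 1, y)]
         else if smer = "^" then c ++ [(x, (PySem.List.pyGetD c (k : Int) (0, 0)).2 + 1)]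
         else if smer = "v" then c ++ [(x, (PySem.List.pyGetD c (k : Int) (0, 0)).2 - 1)]
         else c) = c ++ [(x + dx * ((k : Int) + 1), y + dy * ((k : Int) + 1))]) :
    odsek x y smer razdalja = odsek_alt x y smer razdalja := by
  unfold odsek odsek_alt
  rw [hs]
  rcases le_or_gt razdalja 0 with hr | hr
  · rw [PySem.List.pyRange_one_eq_nil hr]; rfl
  · have hcast : razdalja = ((razdalja.toNat : ℕ) : Int) := by omega
    rw [hcast]
    exact loop_closed x y dx dy _ hf razdalja.toNat

theorem odsek_eq (x : Int) (y : Int) (smer : String) (razdalja : Int) :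
    odsek x y smer razdalja = odsek_alt x y smer razdalja := by
  by_cases h1 : smer = "<"
  · refine odsek_dir x y (-1) 0 smer razdalja (by simp [stepOf, h1]) ?_
    intro c k hget; simp [h1, hget]; ring
  by_cases h2 : smer = ">"
  · refine odsek_dir x y 1 0 smer razdalja (by simp [stepOf, h2]) ?_
    intro c k hget; simp [h2, hget]; ring
  by_cases h3 : smer = "^"
  · refine odsek_dir x y 0 1 smer razdalja (by simp [stepOf, h3]) ?_
    intro c k hget; simp [h3, hget]; ring
  by_cases h4 : smer = "v"
  · refine odsek_dir x y 0 (-1) smer razdalja (by simp [stepOf, h4]) ?_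
    intro c k hget; simp [h4, hget]; ring
  · unfold odsek odsek_alt
    simp only [stepOf, h1, h2, h3, h4, if_false]
    exact foldl_keep _ _

-- ===== VERDICT (by name: the statement is the Claim_ definition above) =====
theorem odsek_spec : Claim_equal_odsek := by
  intro x y smer razdalja _
  exact odsek_eq x y smer razdalja
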